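-- pv_equiv track=rewrite | github.com/alantao5056/USACO | contests/2017_january_bronze/cowtip/cowtip.py | getNumOfTip
-- ===== SOURCE A (Python) =====
-- def flip(grid, x, y):
--   for i in range(0, x + 1):
--     for j in range(0, y + 1):
--       if grid[i][j] == '0':
--         grid[i][j] = '1'
--       else:
--         grid[i][j] = '0'
--
-- def getNumOfTip(grid: list) -> int:
--   count = 0
--   for i in range(len(grid) - 1, -1, -1):
--     for j in range(i, -1, -1):
--       if grid[i][j] == '1':
--         flip(grid, i, j)
--         count += 1
--       if grid[j][i] == '1':
--         flip(grid, j, i)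
--         count += 1
--   return count
-- ===== SOURCE B (Python) =====
-- def _shows_one(s, k):
--   """Whether a cell that originally read s shows '1' after k toggles.
--
--   A toggle turns '0' into '1' and any other string into '0', so after the
--   first toggle the cell is binary and simply alternates."""
--   if k == 0:
--     return s == '1'
--   if s == '0':
--     return k % 2 == 1
--   return k % 2 == 0
--
--
-- def getNumOfTip(grid: list) -> int:
--   # Counts the greedy prefix-rectangle flips without materialising any flip:
--   # a flip recorded at corner (x, y) covers cell (a, b) iff a <= x and b <= y,
--   # so a cell's toggle count is a pair of suffix sums over the recorded
--   # corners.  row_flips[y] counts flips whose corner is (round, y); col_flips[x]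
--   # counts flips whose corner is (x, round).  Does not modify grid.
--   n = len(grid)
--   row_flips = [0] * n
--   col_flips = [0] * n
--   count = 0
--   for i in range(n - 1, -1, -1):
--     # diagonal cell (i, i)
--     if _shows_one(grid[i][i], sum(row_flips[i:]) + sum(col_flips[i:])):
--       row_flips[i] += 1
--       count += 1
--     sr = sum(row_flips[i:])        # toggles covering column i this round on
--     sc = sum(col_flips[i:])        # toggles covering row i this round on
--     srow, scol = sr, sc            # running suffix sums down to column/row j
--     for j in range(i - 1, -1, -1):
--       srow += row_flips[j]
--       scol += col_flips[j]
--       if _shows_one(grid[i][j], srow + sc):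
--         row_flips[j] += 1
--         srow += 1
--         count += 1
--       if _shows_one(grid[j][i], sr + scol):
--         col_flips[j] += 1
--         scol += 1
--         count += 1
--   return count
-- ===== Notes on version B (the rewrite author's own statement) =====
-- stated objective: alternative
-- what changed: Replaces the destructive greedy (which re-flips a whole prefix rectangle of the grid for every '1' it meets) with a non-mutating pass that only records each flip's corner in two counter arrays and reads a cell's current toggle count off a pair of running suffix sums over those counters; Pre_ only excludes grids with a row shorter than the number of rows, on which A raises IndexError (B raises there too).
import Mathlib
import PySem

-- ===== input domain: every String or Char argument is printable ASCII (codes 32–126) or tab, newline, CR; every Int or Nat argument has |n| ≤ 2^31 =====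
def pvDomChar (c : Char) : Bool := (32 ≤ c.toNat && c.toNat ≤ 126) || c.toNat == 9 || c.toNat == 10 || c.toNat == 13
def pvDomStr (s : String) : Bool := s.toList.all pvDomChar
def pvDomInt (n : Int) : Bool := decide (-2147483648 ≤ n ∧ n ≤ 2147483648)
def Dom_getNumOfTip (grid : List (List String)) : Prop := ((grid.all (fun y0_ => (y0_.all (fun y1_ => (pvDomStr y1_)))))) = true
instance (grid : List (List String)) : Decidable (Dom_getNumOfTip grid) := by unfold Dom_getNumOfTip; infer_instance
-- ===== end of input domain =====

-- B replaces A's destructive greedy (which re-flips a whole prefix rectangle of the grid for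
-- every '1' it meets) by a non-mutating pass that only records each flip's corner and reads a
-- cell's toggle count off two running suffix sums; return values are equal on Pre_ (A
-- additionally zeroes `grid` in place, B does not mutate it).


-- ===== PORT A =====
-- grid[i][j]  (defaulting read; exact on Pre_, where every access is in range)
def pvGet (g : List (List String)) (i j : Int) : String :=
  PySem.List.pyGetD (PySem.List.pyGetD g i []) j ""

-- grid[i][j] = v
def pvSet (g : List (List String)) (i j : Int) (v : String) : List (List String) :=
  PySem.List.pySetD g i (PySem.List.pySetD (PySem.List.pyGetD g i []) j v)

-- helper flip(grid, x, y) from A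
def pvFlip (g : List (List String)) (x y : Int) : List (List String) :=
  (PySem.List.pyRange 0 (x + 1) 1).foldl (fun g i =>
    (PySem.List.pyRange 0 (y + 1) 1).foldl (fun g j =>
      if pvGet g i j == "0" then pvSet g i j "1" else pvSet g i j "0") g) g

def getNumOfTip (grid : List (List String)) : Int :=
  ((PySem.List.pyRange (PySem.List.len grid - 1) (-1) (-1)).foldl (fun s i =>
    (PySem.List.pyRange i (-1) (-1)).foldl (fun s j =>
      let s := if pvGet s.1 i j == "1" then (pvFlip s.1 i j, s.2 + 1) else s
      if pvGet s.1 j i == "1" then (pvFlip s.1 j i, s.2 + 1) else s) s)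
    (grid, (0 : Int))).2

-- ===== PORT B =====
-- Source B's helper _shows_one(s, k)
def pvShowsOne (s : String) (k : Int) : Bool :=
  if k == 0 then s == "1"
  else if s == "0" then PySem.Int.mod k 2 == 1
  else PySem.Int.mod k 2 == 0

-- Source B's inner-loop body (state: row_flips, col_flips, count, srow, scol)
def pvBBody (grid : List (List String)) (i SR SC : Int) :
    List Int × List Int × Int × Int × Int → Int → List Int × List Int × Int × Int × Int :=
  fun q j =>
    let srow := q.2.2.2.1 + PySem.List.pyGetD q.1 j 0
    let scol := q.2.2.2.2 + PySem.List.pyGetD q.2.1 j 0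
    let q1 : List Int × List Int × Int × Int × Int :=
      if pvShowsOne (pvGet grid i j) (srow + SC) then
        (PySem.List.pySetD q.1 j (PySem.List.pyGetD q.1 j 0 + 1), q.2.1, q.2.2.1 + 1, srow + 1, scol)
      else (q.1, q.2.1, q.2.2.1, srow, scol)
    if pvShowsOne (pvGet grid j i) (SR + q1.2.2.2.2) then
      (q1.1, PySem.List.pySetD q1.2.1 j (PySem.List.pyGetD q1.2.1 j 0 + 1), q1.2.2.1 + 1, q1.2.2.2.1, q1.2.2.2.2 + 1)
    else q1

def getNumOfTip_alt (grid : List (List String)) : Int :=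
  let n := grid.length
  ((PySem.List.pyRange ((n : Int) - 1) (-1) (-1)).foldl (fun (st : List Int × List Int × Int) i =>
    let st :=
      if pvShowsOne (pvGet grid i i)
          ((PySem.List.slice st.1 (some i) none).sum + (PySem.List.slice st.2.1 (some i) none).sum) then
        (PySem.List.pySetD st.1 i (PySem.List.pyGetD st.1 i 0 + 1), st.2.1, st.2.2 + 1)
      else st
    let sr := (PySem.List.slice st.1 (some i) none).sum
    let sc := (PySem.List.slice st.2.1 (some i) none).sum
    let q := (PySem.List.pyRange (i - 1) (-1) (-1)).foldl (pvBBody grid i sr sc)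
      (st.1, st.2.1, st.2.2, sr, sc)
    (q.1, q.2.1, q.2.2.1))
    (List.replicate n (0 : Int), List.replicate n (0 : Int), (0 : Int))).2.2

-- ===== PRECONDITION & SPEC =====
-- Pre_ excludes exactly the grids with a row shorter than the number of rows, on which
-- the Python A raises IndexError (and B raises as well).
def Pre_getNumOfTip (grid : List (List String)) : Prop :=
  ∀ row ∈ grid, grid.length ≤ row.length
instance (grid : List (List String)) : Decidable (Pre_getNumOfTip grid) := by
  unfold Pre_getNumOfTip; infer_instance

def pvWitness_getNumOfTip : List (List String) := [["1", "0"], ["0", "1"]]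

def Spec_getNumOfTip (grid : List (List String)) (out : Int) : Prop := out = getNumOfTip_alt grid
instance (grid : List (List String)) (out : Int) : Decidable (Spec_getNumOfTip grid out) := by
  unfold Spec_getNumOfTip; infer_instance

-- ===== CLAIM (what is proved, stated in full; the proofs are below) =====
def Claim_equal_getNumOfTip : Prop := ∀ (grid : List (List String)), Dom_getNumOfTip grid → Pre_getNumOfTip grid → Spec_getNumOfTip grid (getNumOfTip grid)

-- ===== LEMMAS AND PROOFS =====

-- Abstract model of A's run: the mutated grid as a function Nat → Nat → String.
def pvToggle (s : String) : String := if s == "0" then "1" else "0"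

def pvFlipS (w : Nat → Nat → String) (x y : Nat) : Nat → Nat → String :=
  fun a b => if a ≤ x ∧ b ≤ y then pvToggle (w a b) else w a b

def pvStepS (i j : Nat) (s : (Nat → Nat → String) × Int) : (Nat → Nat → String) × Int :=
  let s1 := if s.1 i j == "1" then (pvFlipS s.1 i j, s.2 + 1) else s
  if s1.1 j i == "1" then (pvFlipS s1.1 j i, s1.2 + 1) else s1

def pvInnerS (i : Nat) : ((Nat → Nat → String) × Int) → Nat → ((Nat → Nat → String) × Int)
  | s, 0 => s
  | s, (t+1) => pvInnerS i (pvStepS i t s) t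

def pvOuterS : ((Nat → Nat → String) × Int) → Nat → ((Nat → Nat → String) × Int)
  | s, 0 => s
  | s, (m+1) => pvOuterS (pvInnerS m s (m+1)) m

def pvW0 (grid : List (List String)) : Nat → Nat → String :=
  fun a b => (grid.getD a []).getD b ""

def pvRep (n : Nat) (g : List (List String)) (w : Nat → Nat → String) : Prop :=
  g.length = n ∧ (∀ a, a < n → n ≤ (g.getD a []).length) ∧
  (∀ a b, a < n → b < n → (g.getD a []).getD b "" = w a b)

theorem pvGetD_set {α : Type} (l : List α) (i : Nat) (v : α) (d : α) (j : Nat) :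
    (l.set i v).getD j d = if j = i ∧ i < l.length then v else l.getD j d := by
  rcases Nat.lt_trichotomy j i with h | h | h
  · rw [if_neg (by omega)]
    simp [List.getD, List.getElem?_set, show i ≠ j by omega]
  · subst h
    by_cases hl : j < l.length
    · rw [if_pos ⟨rfl, hl⟩]
      simp [List.getD, List.getElem?_set, hl]
    · rw [if_neg (by omega)]
      simp [List.getD, List.getElem?_set, hl]
  · rw [if_neg (by omega)]
    simp [List.getD, List.getElem?_set, show i ≠ j by omega]

theorem pvGet_natCast (g : List (List String)) (a b : Nat) :
    pvGet g (a : Int) (b : Int) = (g.getD a []).getD b "" := by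
  simp [pvGet]

theorem pvSet_natCast (g : List (List String)) (a b : Nat) (v : String) :
    pvSet g (a : Int) (b : Int) v = g.set a ((g.getD a []).set b v) := by
  simp [pvSet]

theorem pvSet_read (g : List (List String)) (a b x y : Nat) (v : String)
    (ha : a < g.length) (hb : b < (g.getD a []).length) :
    ((pvSet g (a : Int) (b : Int) v).getD x []).getD y ""
      = if x = a ∧ y = b then v else (g.getD x []).getD y "" := by
  rw [pvSet_natCast, pvGetD_set]
  by_cases hx : x = a
  · subst hx
    rw [if_pos ⟨rfl, ha⟩, pvGetD_set]
    by_cases hy : y = b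
    · subst hy
      rw [if_pos ⟨rfl, hb⟩, if_pos ⟨rfl, rfl⟩]
    · rw [if_neg (by tauto), if_neg (by tauto)]
  · rw [if_neg (by tauto), if_neg (by tauto)]

theorem pvSet_len (g : List (List String)) (a b : Nat) (v : String) :
    (pvSet g (a : Int) (b : Int) v).length = g.length := by
  rw [pvSet_natCast]; simp

theorem pvSet_rowlen (g : List (List String)) (a b : Nat) (v : String) (x : Nat) :
    ((pvSet g (a : Int) (b : Int) v).getD x []).length = (g.getD x []).length := by
  rw [pvSet_natCast, pvGetD_set]
  by_cases h : x = a ∧ a < g.length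
  · rw [if_pos h]; rw [List.length_set]; rw [h.1]
  · rw [if_neg h]

-- the flip body at one cell is a single toggle write
theorem pvFlipBody_eq (g : List (List String)) (i j : Int) :
    (if pvGet g i j == "0" then pvSet g i j "1" else pvSet g i j "0")
      = pvSet g i j (pvToggle (pvGet g i j)) := by
  unfold pvToggle
  by_cases h : pvGet g i j == "0" <;> simp [h]

theorem pvRowFold (iN : Nat) (k : Nat) : ∀ (g : List (List String)), iN < g.length →
    k ≤ (g.getD iN []).length →
    ((((PySem.List.pyRange 0 (k : Int) 1).foldl (fun g j =>
        if pvGet g (iN : Int) j == "0" then pvSet g (iN : Int) j "1"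
        else pvSet g (iN : Int) j "0") g)).length = g.length) ∧
    (∀ x, ((((PySem.List.pyRange 0 (k : Int) 1).foldl (fun g j =>
        if pvGet g (iN : Int) j == "0" then pvSet g (iN : Int) j "1"
        else pvSet g (iN : Int) j "0") g)).getD x []).length = (g.getD x []).length) ∧
    (∀ x y, ((((PySem.List.pyRange 0 (k : Int) 1).foldl (fun g j =>
        if pvGet g (iN : Int) j == "0" then pvSet g (iN : Int) j "1"
        else pvSet g (iN : Int) j "0") g)).getD x []).getD y ""
      = if x = iN ∧ y < k then pvToggle ((g.getD x []).getD y "")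
        else (g.getD x []).getD y "") := by
  induction k with
  | zero =>
    intro g hi hk
    have h0 : PySem.List.pyRange 0 ((0 : Nat) : Int) 1 = [] :=
      PySem.List.pyRange_one_eq_nil (by omega)
    rw [h0]
    exact ⟨rfl, fun x => rfl, fun x y => by rw [List.foldl_nil, if_neg (by omega)]⟩
  | succ k ih =>
    intro g hi hk
    obtain ⟨ihl, ihrl, ihr⟩ := ih g hi (by omega)
    have hsplit : PySem.List.pyRange 0 ((k+1 : Nat) : Int) 1
        = PySem.List.pyRange 0 (k : Nat) 1 ++ [(k : Int)] := by
      push_cast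
      exact PySem.List.pyRange_one_succ_right (by omega)
    rw [hsplit, List.foldl_append]
    simp only [List.foldl_cons, List.foldl_nil]
    rw [pvFlipBody_eq]
    set gp := (PySem.List.pyRange 0 (k : Int) 1).foldl (fun g j =>
        if pvGet g (iN : Int) j == "0" then pvSet g (iN : Int) j "1"
        else pvSet g (iN : Int) j "0") g with hgp
    have hget : pvGet gp (iN : Int) (k : Int) = (g.getD iN []).getD k "" := by
      rw [pvGet_natCast, ihr iN k, if_neg (by omega)]
    have hi' : iN < gp.length := by omega
    have hk' : k < (gp.getD iN []).length := by rw [ihrl iN]; omega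
    refine ⟨?_, ?_, ?_⟩
    · rw [hget, pvSet_len]; exact ihl
    · intro x
      rw [hget, pvSet_rowlen]; exact ihrl x
    · intro x y
      rw [hget, pvSet_read gp iN k x y _ hi' hk', ihr x y]
      by_cases hx : x = iN
      · by_cases hy : y = k
        · rw [if_pos ⟨hx, hy⟩, if_pos (show x = iN ∧ y < k + 1 by omega), hx, hy]
        · by_cases hyk : y < k
          · rw [if_neg (by tauto), if_pos ⟨hx, hyk⟩, if_pos (by omega)]
          · rw [if_neg (by tauto), if_neg (by tauto), if_neg (by omega)]
      · rw [if_neg (by tauto), if_neg (by tauto), if_neg (by tauto)]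

theorem pvFlipFold (K : Nat) : ∀ (M : Nat) (g : List (List String)), M ≤ g.length →
    (∀ a, a < g.length → K ≤ (g.getD a []).length) →
    ((((PySem.List.pyRange 0 (M : Int) 1).foldl (fun g i =>
        (PySem.List.pyRange 0 (K : Int) 1).foldl (fun g j =>
          if pvGet g i j == "0" then pvSet g i j "1" else pvSet g i j "0") g) g)).length
       = g.length) ∧
    (∀ x, ((((PySem.List.pyRange 0 (M : Int) 1).foldl (fun g i =>
        (PySem.List.pyRange 0 (K : Int) 1).foldl (fun g j =>
          if pvGet g i j == "0" then pvSet g i j "1" else pvSet g i j "0") g) g)).getD x []).length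
       = (g.getD x []).length) ∧
    (∀ x y, ((((PySem.List.pyRange 0 (M : Int) 1).foldl (fun g i =>
        (PySem.List.pyRange 0 (K : Int) 1).foldl (fun g j =>
          if pvGet g i j == "0" then pvSet g i j "1" else pvSet g i j "0") g) g)).getD x []).getD y ""
      = if x < M ∧ y < K then pvToggle ((g.getD x []).getD y "")
        else (g.getD x []).getD y "") := by
  intro M
  induction M with
  | zero =>
    intro g hM hK
    have h0 : PySem.List.pyRange 0 ((0 : Nat) : Int) 1 = [] :=
      PySem.List.pyRange_one_eq_nil (by omega)
    rw [h0]
    exact ⟨rfl, fun x => rfl, fun x y => by rw [List.foldl_nil, if_neg (by omega)]⟩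
  | succ M ih =>
    intro g hM hK
    obtain ⟨ihl, ihrl, ihr⟩ := ih g (by omega) hK
    have hsplit : PySem.List.pyRange 0 ((M+1 : Nat) : Int) 1
        = PySem.List.pyRange 0 (M : Nat) 1 ++ [(M : Int)] := by
      push_cast
      exact PySem.List.pyRange_one_succ_right (by omega)
    rw [hsplit, List.foldl_append]
    simp only [List.foldl_cons, List.foldl_nil]
    set gp := (PySem.List.pyRange 0 (M : Int) 1).foldl (fun g i =>
        (PySem.List.pyRange 0 (K : Int) 1).foldl (fun g j =>
          if pvGet g i j == "0" then pvSet g i j "1" else pvSet g i j "0") g) g with hgp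
    obtain ⟨rl, rrl, rr⟩ := pvRowFold M K gp (by omega) (by rw [ihrl]; exact hK M (by omega))
    refine ⟨?_, ?_, ?_⟩
    · rw [rl]; exact ihl
    · intro x
      rw [rrl x]; exact ihrl x
    · intro x y
      rw [rr x y, ihr x y]
      by_cases hx : x = M
      · by_cases hy : y < K
        · rw [if_pos ⟨hx, hy⟩, if_neg (by omega), if_pos (by omega)]
        · rw [if_neg (by tauto), if_neg (by tauto), if_neg (by omega)]
      · by_cases hrest : x < M ∧ y < K
        · rw [if_neg (by tauto), if_pos hrest, if_pos (by omega)]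
        · rw [if_neg (by tauto), if_neg hrest, if_neg (by omega)]

theorem pvRep_flip (n : Nat) (g : List (List String)) (w : Nat → Nat → String) (x y : Nat)
    (hrep : pvRep n g w) (hx : x < n) (hy : y < n) :
    pvRep n (pvFlip g (x : Int) (y : Int)) (pvFlipS w x y) := by
  obtain ⟨hlen, hrl, hread⟩ := hrep
  have hcx : (x : Int) + 1 = ((x + 1 : Nat) : Int) := by push_cast; ring
  have hcy : (y : Int) + 1 = ((y + 1 : Nat) : Int) := by push_cast; ring
  unfold pvFlip
  rw [hcx, hcy]
  obtain ⟨fl, frl, fr⟩ := pvFlipFold (y+1) (x+1) g (by omega) (fun a ha => by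
    have := hrl a (by omega); omega)
  refine ⟨by rw [fl]; exact hlen, fun a ha => by rw [frl a]; exact hrl a ha, ?_⟩
  intro a b ha hb
  rw [fr a b]
  simp only [pvFlipS]
  by_cases hc : a ≤ x ∧ b ≤ y
  · rw [if_pos (by omega), if_pos hc, hread a b ha hb]
  · rw [if_neg (by omega), if_neg hc, hread a b ha hb]

theorem pvInnerA_eq (n iN : Nat) (hi : iN < n) : ∀ (k : Nat), k ≤ iN + 1 →
    ∀ (g : List (List String)) (w : Nat → Nat → String) (c : Int), pvRep n g w →
    pvRep n ((PySem.List.pyRange ((k : Int) - 1) (-1) (-1)).foldl (fun s j =>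
        let s := if pvGet s.1 (iN : Int) j == "1" then (pvFlip s.1 (iN : Int) j, s.2 + 1) else s
        if pvGet s.1 j (iN : Int) == "1" then (pvFlip s.1 j (iN : Int), s.2 + 1) else s)
        (g, c)).1
      (pvInnerS iN (w, c) k).1 ∧
    ((PySem.List.pyRange ((k : Int) - 1) (-1) (-1)).foldl (fun s j =>
        let s := if pvGet s.1 (iN : Int) j == "1" then (pvFlip s.1 (iN : Int) j, s.2 + 1) else s
        if pvGet s.1 j (iN : Int) == "1" then (pvFlip s.1 j (iN : Int), s.2 + 1) else s)
        (g, c)).2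
      = (pvInnerS iN (w, c) k).2 := by
  intro k
  induction k with
  | zero =>
    intro _ g w c hrep
    have h0 : PySem.List.pyRange (((0 : Nat) : Int) - 1) (-1) (-1) = [] := by
      rw [show (((0 : Nat) : Int) - 1) = -1 by norm_num]
      exact PySem.List.pyRange_neg_one_eq_nil (by omega)
    rw [h0]
    exact ⟨hrep, rfl⟩
  | succ k ih =>
    intro hk g w c hrep
    have hk' : k < n := by omega
    have hc1 : (((k + 1 : Nat) : Int) - 1) = (k : Int) := by push_cast; ring
    have hcons : PySem.List.pyRange ((k : Int)) (-1) (-1)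
        = (k : Int) :: PySem.List.pyRange ((k : Int) - 1) (-1) (-1) :=
      PySem.List.pyRange_neg_one_cons (by omega)
    have heq : pvInnerS iN (w, c) (k + 1) = pvInnerS iN (pvStepS iN k (w, c)) k := rfl
    rw [hc1, hcons, List.foldl_cons, heq]
    have hread1 : pvGet g (iN : Int) (k : Int) = w iN k := by
      rw [pvGet_natCast]; exact hrep.2.2 iN k hi hk'
    by_cases h1 : (w iN k == "1") = true
    · have hrep1 : pvRep n (pvFlip g (iN : Int) (k : Int)) (pvFlipS w iN k) :=
        pvRep_flip n g w iN k hrep hi hk'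
      have hread2 : pvGet (pvFlip g (iN : Int) (k : Int)) (k : Int) (iN : Int)
          = pvFlipS w iN k k iN := by
        rw [pvGet_natCast]; exact hrep1.2.2 k iN hk' hi
      by_cases h2 : (pvFlipS w iN k k iN == "1") = true
      · have hm : pvStepS iN k (w, c) = (pvFlipS (pvFlipS w iN k) k iN, c + 1 + 1) := by
          simp [pvStepS, h1, h2]
        simp only [hread1, h1, hread2, h2, if_true, hm]
        exact ih (by omega) _ _ _ (pvRep_flip n _ _ k iN hrep1 hk' hi)
      · rw [Bool.not_eq_true] at h2
        have hm : pvStepS iN k (w, c) = (pvFlipS w iN k, c + 1) := by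
          simp [pvStepS, h1, h2]
        simp only [hread1, h1, hread2, h2, if_true, Bool.false_eq_true, if_false, hm]
        exact ih (by omega) _ _ _ hrep1
    · rw [Bool.not_eq_true] at h1
      have hread2 : pvGet g (k : Int) (iN : Int) = w k iN := by
        rw [pvGet_natCast]; exact hrep.2.2 k iN hk' hi
      by_cases h2 : (w k iN == "1") = true
      · have hm : pvStepS iN k (w, c) = (pvFlipS w k iN, c + 1) := by
          simp [pvStepS, h1, h2]
        simp only [hread1, h1, hread2, h2, if_true, Bool.false_eq_true, if_false, hm]
        exact ih (by omega) _ _ _ (pvRep_flip n g w k iN hrep hk' hi)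
      · rw [Bool.not_eq_true] at h2
        have hm : pvStepS iN k (w, c) = (w, c) := by
          simp [pvStepS, h1, h2]
        simp only [hread1, h1, hread2, h2, Bool.false_eq_true, if_false, hm]
        exact ih (by omega) _ _ _ hrep

theorem pvOuterA_eq (n : Nat) : ∀ (m : Nat), m ≤ n →
    ∀ (g : List (List String)) (w : Nat → Nat → String) (c : Int), pvRep n g w →
    ((PySem.List.pyRange ((m : Int) - 1) (-1) (-1)).foldl (fun s i =>
        (PySem.List.pyRange i (-1) (-1)).foldl (fun s j =>
          let s := if pvGet s.1 i j == "1" then (pvFlip s.1 i j, s.2 + 1) else s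
          if pvGet s.1 j i == "1" then (pvFlip s.1 j i, s.2 + 1) else s) s)
        (g, c)).2
      = (pvOuterS (w, c) m).2 := by
  intro m
  induction m with
  | zero =>
    intro _ g w c _
    have h0 : PySem.List.pyRange (((0 : Nat) : Int) - 1) (-1) (-1) = [] := by
      rw [show (((0 : Nat) : Int) - 1) = -1 by norm_num]
      exact PySem.List.pyRange_neg_one_eq_nil (by omega)
    rw [h0]
    rfl
  | succ m ih =>
    intro hm g w c hrep
    have hm' : m < n := by omega
    have hc1 : (((m + 1 : Nat) : Int) - 1) = (m : Int) := by push_cast; ring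
    have hcons : PySem.List.pyRange ((m : Int)) (-1) (-1)
        = (m : Int) :: PySem.List.pyRange ((m : Int) - 1) (-1) (-1) :=
      PySem.List.pyRange_neg_one_cons (by omega)
    have heq : pvOuterS (w, c) (m + 1) = pvOuterS (pvInnerS m (w, c) (m + 1)) m := rfl
    rw [hc1, hcons, List.foldl_cons, heq]
    obtain ⟨hr, hcnt⟩ := pvInnerA_eq n m hm' (m + 1) (le_refl _) g w c hrep
    rw [hc1] at hr hcnt
    rw [← Prod.mk.eta (p := (PySem.List.pyRange ((m : Int)) (-1) (-1)).foldl
      (fun s j =>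
        let s := if pvGet s.1 (m : Int) j == "1" then (pvFlip s.1 (m : Int) j, s.2 + 1) else s
        if pvGet s.1 j (m : Int) == "1" then (pvFlip s.1 j (m : Int), s.2 + 1) else s)
      (g, c)), hcnt, ← Prod.mk.eta (p := pvInnerS m (w, c) (m + 1))]
    exact ih (by omega) _ _ _ hr

theorem pvRep_init (grid : List (List String)) (hpre : Pre_getNumOfTip grid) :
    pvRep grid.length grid (pvW0 grid) := by
  refine ⟨rfl, ?_, fun a b _ _ => rfl⟩
  intro a ha
  have hmem : grid.getD a [] ∈ grid := by
    rw [List.getD_eq_getElem grid [] ha]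
    exact List.getElem_mem ha
  exact hpre _ hmem

theorem pvA_eq (grid : List (List String)) (hpre : Pre_getNumOfTip grid) :
    getNumOfTip grid = (pvOuterS (pvW0 grid, 0) grid.length).2 := by
  unfold getNumOfTip
  rw [show PySem.List.len grid = ((grid.length : Nat) : Int) from PySem.List.len_eq grid]
  exact pvOuterA_eq grid.length grid.length (le_refl _) grid (pvW0 grid) 0
    (pvRep_init grid hpre)

-- ===== B-side machinery: toggle powers and suffix sums =====
def pvTpow : Nat → String → String
  | 0, s => s
  | (k+1), s => pvTpow k (pvToggle s)

def pvValN (s : String) (k : Nat) : Bool :=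
  if k = 0 then s == "1"
  else if s == "0" then decide (k % 2 = 1) else decide (k % 2 = 0)

theorem pvValN_succ (s : String) (k : Nat) : pvValN s (k + 1) = pvValN (pvToggle s) k := by
  by_cases h : s == "0"
  · have hs : s = "0" := eq_of_beq h
    subst hs
    unfold pvValN pvToggle
    by_cases hk : k = 0 <;> simp [hk] <;> omega
  · unfold pvValN pvToggle
    rw [if_neg (by simpa using h), if_neg (by simpa using h)]
    by_cases hk : k = 0 <;> simp [hk, h] <;> omega

theorem pvTpow_read (k : Nat) : ∀ (s : String), (pvTpow k s == "1") = pvValN s k := by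
  induction k with
  | zero => intro s; simp [pvTpow, pvValN]
  | succ k ih =>
    intro s
    rw [show pvTpow (k+1) s = pvTpow k (pvToggle s) from rfl, ih, pvValN_succ]

theorem pvTpow_succ_out (k : Nat) : ∀ s, pvTpow (k + 1) s = pvToggle (pvTpow k s) := by
  induction k with
  | zero => intro s; rfl
  | succ k ih =>
    intro s
    rw [show pvTpow (k+1+1) s = pvTpow (k+1) (pvToggle s) from rfl, ih,
      show pvTpow (k+1) s = pvTpow k (pvToggle s) from rfl]

theorem pvShowsOne_eq (s : String) (k : Int) (hk : 0 ≤ k) : pvShowsOne s k = pvValN s k.toNat := by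
  unfold pvShowsOne pvValN
  by_cases h0 : k = 0
  · simp [h0]
  · have h1 : ¬ (k.toNat = 0) := by omega
    have hmod : PySem.Int.mod k 2 = ((k.toNat % 2 : Nat) : Int) := by
      rw [show k = ((k.toNat : Nat) : Int) by omega]
      exact_mod_cast PySem.Int.mod_natCast k.toNat 2
    rw [if_neg (by simpa using h0), if_neg h1]
    by_cases hz : s == "0"
    · rw [if_pos hz, if_pos hz, hmod]
      by_cases hp : k.toNat % 2 = 1 <;> simp [hp] <;> omega
    · rw [if_neg hz, if_neg hz, hmod]
      by_cases hp : k.toNat % 2 = 0 <;> simp [hp] <;> omega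

-- suffix sum of an Int list from index t
def pvSuf (l : List Int) (t : Nat) : Int := (l.drop t).sum

theorem pvSlice_sum (l : List Int) (t : Nat) :
    (PySem.List.slice l (some ((t : Nat) : Int)) none).sum = pvSuf l t := by
  rw [PySem.List.slice_from_natCast]; rfl

theorem pvSuf_step (l : List Int) (b : Nat) (hb : b < l.length) :
    pvSuf l b = l.getD b 0 + pvSuf l (b + 1) := by
  unfold pvSuf
  rw [List.drop_eq_getElem_cons hb, List.sum_cons, List.getD_eq_getElem l 0 hb]

theorem pvSuf_nonneg (l : List Int) (b : Nat) (h : ∀ y, 0 ≤ l.getD y 0) : 0 ≤ pvSuf l b := by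
  unfold pvSuf
  apply List.sum_nonneg
  intro x hx
  obtain ⟨i, hi, rfl⟩ := List.mem_iff_getElem.mp hx
  rw [List.getElem_drop]
  have hlt : b + i < l.length := by
    have := (List.length_drop ..) ▸ hi
    omega
  have := h (b + i)
  rwa [List.getD_eq_getElem l 0 hlt] at this

theorem pvSum_set (l : List Int) : ∀ (j : Nat) (v : Int), j < l.length →
    (l.set j v).sum = l.sum + v - l.getD j 0 := by
  induction l with
  | nil => intro j v hj; simp at hj
  | cons x xs ih =>
    intro j v hj
    cases j with
    | zero => simp [List.set]; ring
    | succ j =>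
      simp only [List.set, List.sum_cons, List.getD_cons_succ]
      rw [ih j v (by simpa using hj)]
      ring

theorem pvSuf_set_succ (l : List Int) (j : Nat) (hj : j < l.length) (b : Nat) :
    pvSuf (l.set j (l.getD j 0 + 1)) b = pvSuf l b + (if b ≤ j then 1 else 0) := by
  unfold pvSuf
  rw [List.drop_set]
  by_cases hb : j < b
  · rw [if_pos hb, if_neg (by omega)]
    ring
  · rw [if_neg hb, if_pos (by omega)]
    have hjb : j - b < (l.drop b).length := by
      rw [List.length_drop]
      omega
    rw [pvSum_set (l.drop b) (j - b) _ hjb]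
    have : (l.drop b).getD (j - b) 0 = l.getD j 0 := by
      rw [List.getD_eq_getElem _ 0 hjb, List.getElem_drop,
        List.getD_eq_getElem l 0 (by omega)]
      congr 1
      omega
    rw [this]
    ring

theorem pvUpdRow (grid : List (List String)) (iN t : Nat) (w : Nat → Nat → String)
    (dX dY : List Int) (ht : t ≤ iN) (htl : t < dX.length)
    (hN1 : ∀ y, 0 ≤ dX.getD y 0) (hN2 : ∀ y, 0 ≤ dY.getD y 0)
    (hW : ∀ a b, a ≤ iN → b ≤ iN →
      w a b = pvTpow (pvSuf dX b + pvSuf dY a).toNat (pvW0 grid a b)) :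
    ∀ a b, a ≤ iN → b ≤ iN → pvFlipS w iN t a b
      = pvTpow (pvSuf (dX.set t (dX.getD t 0 + 1)) b + pvSuf dY a).toNat (pvW0 grid a b) := by
  intro a b ha hb
  rw [pvSuf_set_succ dX t htl b]
  have hnn : 0 ≤ pvSuf dX b + pvSuf dY a :=
    add_nonneg (pvSuf_nonneg dX b hN1) (pvSuf_nonneg dY a hN2)
  simp only [pvFlipS]
  by_cases hbt : b ≤ t
  · rw [if_pos ⟨ha, hbt⟩, if_pos hbt, hW a b ha hb,
      show pvSuf dX b + 1 + pvSuf dY a = (pvSuf dX b + pvSuf dY a) + 1 by ring,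
      show ((pvSuf dX b + pvSuf dY a) + 1).toNat = (pvSuf dX b + pvSuf dY a).toNat + 1 by omega,
      pvTpow_succ_out]
  · rw [if_neg (by tauto), if_neg hbt, hW a b ha hb]
    ring_nf

theorem pvUpdCol (grid : List (List String)) (iN t : Nat) (w : Nat → Nat → String)
    (dX dY : List Int) (ht : t ≤ iN) (htl : t < dY.length)
    (hN1 : ∀ y, 0 ≤ dX.getD y 0) (hN2 : ∀ y, 0 ≤ dY.getD y 0)
    (hW : ∀ a b, a ≤ iN → b ≤ iN →
      w a b = pvTpow (pvSuf dX b + pvSuf dY a).toNat (pvW0 grid a b)) :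
    ∀ a b, a ≤ iN → b ≤ iN → pvFlipS w t iN a b
      = pvTpow (pvSuf dX b + pvSuf (dY.set t (dY.getD t 0 + 1)) a).toNat (pvW0 grid a b) := by
  intro a b ha hb
  rw [pvSuf_set_succ dY t htl a]
  have hnn : 0 ≤ pvSuf dX b + pvSuf dY a :=
    add_nonneg (pvSuf_nonneg dX b hN1) (pvSuf_nonneg dY a hN2)
  simp only [pvFlipS]
  by_cases hat : a ≤ t
  · rw [if_pos ⟨hat, hb⟩, if_pos hat, hW a b ha hb,
      show pvSuf dX b + (pvSuf dY a + 1) = pvSuf dX b + pvSuf dY a + 1 by ring,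
      show (pvSuf dX b + pvSuf dY a + 1).toNat = (pvSuf dX b + pvSuf dY a).toNat + 1 by omega,
      pvTpow_succ_out]
  · rw [if_neg (by tauto), if_neg hat, hW a b ha hb]
    ring_nf

-- the model's diagonal double-check collapses to a single check
theorem pvStepS_diag (iN : Nat) (w : Nat → Nat → String) (c : Int) :
    pvStepS iN iN (w, c) = if (w iN iN == "1") = true then (pvFlipS w iN iN, c + 1) else (w, c) := by
  by_cases h : (w iN iN == "1") = true
  · have hflip : pvFlipS w iN iN iN iN = pvToggle (w iN iN) := by
      simp [pvFlipS]
    have hone : w iN iN = "1" := eq_of_beq h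
    have h2 : (pvFlipS w iN iN iN iN == "1") = false := by
      rw [hflip, hone]; rfl
    simp [pvStepS, h, h2]
  · rw [Bool.not_eq_true] at h
    simp [pvStepS, h]

-- sweep invariant for Source B's inner loop, fuel t remaining
def pvSInv (grid : List (List String)) (n iN t : Nat) (SR SC : Int)
    (w : Nat → Nat → String) (c : Int)
    (RC CC : List Int) (count srow scol : Int) : Prop :=
  RC.length = n ∧ CC.length = n ∧
  (∀ y, 0 ≤ RC.getD y 0) ∧ (∀ y, 0 ≤ CC.getD y 0) ∧
  count = c ∧ srow = pvSuf RC t ∧ scol = pvSuf CC t ∧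
  SR = pvSuf RC iN ∧ SC = pvSuf CC iN ∧
  (∀ a b, a ≤ iN → b ≤ iN → w a b = pvTpow (pvSuf RC b + pvSuf CC a).toNat (pvW0 grid a b))

def pvSOut (grid : List (List String)) (n iN : Nat) (w : Nat → Nat → String) (c : Int)
    (t : Nat) (r : List Int × List Int × Int × Int × Int) : Prop :=
  r.1.length = n ∧ r.2.1.length = n ∧
  (∀ y, 0 ≤ r.1.getD y 0) ∧ (∀ y, 0 ≤ r.2.1.getD y 0) ∧
  r.2.2.1 = (pvInnerS iN (w, c) t).2 ∧
  (∀ a b, a ≤ iN → b ≤ iN →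
    (pvInnerS iN (w, c) t).1 a b
      = pvTpow (pvSuf r.1 b + pvSuf r.2.1 a).toNat (pvW0 grid a b))

theorem pvSOut_shift (grid : List (List String)) (n iN : Nat)
    (w w' : Nat → Nat → String) (c c' : Int) (t : Nat)
    (r : List Int × List Int × Int × Int × Int)
    (h : pvInnerS iN (w, c) (t + 1) = pvInnerS iN (w', c') t) :
    pvSOut grid n iN w' c' t r → pvSOut grid n iN w c (t + 1) r := by
  unfold pvSOut
  rw [h]
  exact id

theorem pvSweep (grid : List (List String)) (n iN : Nat) (hi : iN < n) (SR SC : Int) :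
    ∀ t, t ≤ iN →
    ∀ (w : Nat → Nat → String) (c : Int) (RC CC : List Int) (count srow scol : Int),
    pvSInv grid n iN t SR SC w c RC CC count srow scol →
    pvSOut grid n iN w c t
      ((PySem.List.pyRange ((t : Int) - 1) (-1) (-1)).foldl (pvBBody grid (iN : Int) SR SC)
        (RC, CC, count, srow, scol)) := by
  intro t
  induction t with
  | zero =>
    intro _ w c RC CC count srow scol hinv
    obtain ⟨hL1, hL2, hN1, hN2, hC, _, _, _, _, hW⟩ := hinv
    have h0 : PySem.List.pyRange (((0 : Nat) : Int) - 1) (-1) (-1) = [] := by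
      rw [show (((0 : Nat) : Int) - 1) = -1 by norm_num]
      exact PySem.List.pyRange_neg_one_eq_nil (by omega)
    rw [h0]
    exact ⟨hL1, hL2, hN1, hN2, hC, hW⟩
  | succ t ih =>
    intro ht w c RC CC count srow scol hinv
    obtain ⟨hL1, hL2, hN1, hN2, hC, hSrow, hScol, hSR, hSC, hW⟩ := hinv
    have htn : t < iN := by omega
    have htl : t < RC.length := by omega
    have htl2 : t < CC.length := by omega
    have hc1 : (((t + 1 : Nat) : Int) - 1) = (t : Int) := by push_cast; ring
    have hcons : PySem.List.pyRange ((t : Int)) (-1) (-1)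
        = (t : Int) :: PySem.List.pyRange ((t : Int) - 1) (-1) (-1) :=
      PySem.List.pyRange_neg_one_cons (by omega)
    rw [hc1, hcons, List.foldl_cons]
    -- the step's running sums
    have hxr : srow + PySem.List.pyGetD RC (t : Int) 0 = pvSuf RC t := by
      simp only [PySem.List.pyGetD_natCast]
      rw [hSrow, pvSuf_step RC t htl]
      ring
    have hxc : scol + PySem.List.pyGetD CC (t : Int) 0 = pvSuf CC t := by
      simp only [PySem.List.pyGetD_natCast]
      rw [hScol, pvSuf_step CC t htl2]
      ring
    -- the first (row) condition
    have hk1nn : 0 ≤ pvSuf RC t + pvSuf CC iN :=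
      add_nonneg (pvSuf_nonneg RC t hN1) (pvSuf_nonneg CC iN hN2)
    have hget1 : pvGet grid (iN : Int) (t : Int) = pvW0 grid iN t := by
      rw [pvGet_natCast]; rfl
    have hcond1 : pvShowsOne (pvGet grid (iN : Int) (t : Int)) (pvSuf RC t + SC)
        = (w iN t == "1") := by
      rw [hget1, hSC, pvShowsOne_eq _ _ hk1nn, hW iN t (le_refl _) (by omega), pvTpow_read]
    have hsetX : PySem.List.pySetD RC (t : Int) (PySem.List.pyGetD RC (t : Int) 0 + 1)
        = RC.set t (RC.getD t 0 + 1) := by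
      simp
    have hsetY : PySem.List.pySetD CC (t : Int) (PySem.List.pyGetD CC (t : Int) 0 + 1)
        = CC.set t (CC.getD t 0 + 1) := by
      simp
    have hN1' : ∀ y, 0 ≤ (RC.set t (RC.getD t 0 + 1)).getD y 0 := by
      intro y
      rw [pvGetD_set]
      by_cases hy : y = t ∧ t < RC.length
      · rw [if_pos hy]; have := hN1 t; omega
      · rw [if_neg hy]; exact hN1 y
    have hN2' : ∀ y, 0 ≤ (CC.set t (CC.getD t 0 + 1)).getD y 0 := by
      intro y
      rw [pvGetD_set]
      by_cases hy : y = t ∧ t < CC.length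
      · rw [if_pos hy]; have := hN2 t; omega
      · rw [if_neg hy]; exact hN2 y
    have hflipro : pvFlipS w iN t t iN = w t iN := by
      simp only [pvFlipS]
      rw [if_neg (by omega)]
    have hmodel : pvInnerS iN (w, c) (t + 1) = pvInnerS iN (pvStepS iN t (w, c)) t := rfl
    by_cases h1 : (w iN t == "1") = true <;>
      [skip; rw [Bool.not_eq_true] at h1]
    · -- the row check fires
      have hW1 : ∀ a b, a ≤ iN → b ≤ iN → pvFlipS w iN t a b
          = pvTpow (pvSuf (RC.set t (RC.getD t 0 + 1)) b + pvSuf CC a).toNat (pvW0 grid a b) :=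
        pvUpdRow grid iN t w RC CC (by omega) htl hN1 hN2 hW
      have hSR1 : SR = pvSuf (RC.set t (RC.getD t 0 + 1)) iN := by
        rw [pvSuf_set_succ RC t htl iN, if_neg (by omega), hSR]
        ring
      have hk2nn : 0 ≤ pvSuf (RC.set t (RC.getD t 0 + 1)) iN + pvSuf CC t :=
        add_nonneg (pvSuf_nonneg _ iN hN1') (pvSuf_nonneg CC t hN2)
      have hget2 : pvGet grid (t : Int) (iN : Int) = pvW0 grid t iN := by
        rw [pvGet_natCast]; rfl
      have hcond2 : pvShowsOne (pvGet grid (t : Int) (iN : Int)) (SR + pvSuf CC t)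
          = (pvFlipS w iN t t iN == "1") := by
        rw [hget2, hSR1, pvShowsOne_eq _ _ hk2nn, hW1 t iN (by omega) (le_refl _), pvTpow_read]
      have hB : pvBBody grid (iN : Int) SR SC (RC, CC, count, srow, scol) (t : Int)
          = if pvShowsOne (pvGet grid (t : Int) (iN : Int)) (SR + pvSuf CC t) then
              (RC.set t (RC.getD t 0 + 1), CC.set t (CC.getD t 0 + 1), count + 1 + 1,
                pvSuf RC t + 1, pvSuf CC t + 1)
            else (RC.set t (RC.getD t 0 + 1), CC, count + 1, pvSuf RC t + 1, pvSuf CC t) := by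
        simp only [pvBBody, hxr, hxc, hcond1, if_pos h1, hsetX, hsetY]
      by_cases h2 : (pvFlipS w iN t t iN == "1") = true
      · -- both fire
        have hM : pvStepS iN t (w, c) = (pvFlipS (pvFlipS w iN t) t iN, c + 1 + 1) := by
          simp [pvStepS, h1, h2]
        rw [hB, hcond2, if_pos h2]
        apply pvSOut_shift grid n iN w _ c _ t _ (by rw [hmodel, hM])
        apply ih (by omega)
        refine ⟨by simpa using hL1, by simpa using hL2, hN1', hN2', by omega, ?_, ?_, hSR1, ?_, ?_⟩
        · rw [pvSuf_set_succ RC t htl t, if_pos (le_refl t)]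
        · rw [pvSuf_set_succ CC t htl2 t, if_pos (le_refl t)]
        · rw [pvSuf_set_succ CC t htl2 iN, if_neg (by omega), hSC]
          ring
        · exact pvUpdCol grid iN t (pvFlipS w iN t) (RC.set t (RC.getD t 0 + 1)) CC
            (by omega) htl2 hN1' hN2 hW1
      · -- only the row check fires
        rw [Bool.not_eq_true] at h2
        have hM : pvStepS iN t (w, c) = (pvFlipS w iN t, c + 1) := by
          simp [pvStepS, h1, h2]
        rw [hB, hcond2]
        simp only [h2, Bool.false_eq_true, if_false]
        apply pvSOut_shift grid n iN w _ c _ t _ (by rw [hmodel, hM])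
        apply ih (by omega)
        refine ⟨by simpa using hL1, hL2, hN1', hN2, by omega, ?_, rfl, hSR1, hSC, hW1⟩
        rw [pvSuf_set_succ RC t htl t, if_pos (le_refl t)]
    · -- the row check does not fire
      have hk2nn : 0 ≤ pvSuf RC iN + pvSuf CC t :=
        add_nonneg (pvSuf_nonneg RC iN hN1) (pvSuf_nonneg CC t hN2)
      have hget2 : pvGet grid (t : Int) (iN : Int) = pvW0 grid t iN := by
        rw [pvGet_natCast]; rfl
      have hcond2 : pvShowsOne (pvGet grid (t : Int) (iN : Int)) (SR + pvSuf CC t)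
          = (w t iN == "1") := by
        rw [hget2, hSR, pvShowsOne_eq _ _ hk2nn, hW t iN (by omega) (le_refl _), pvTpow_read]
      have hB : pvBBody grid (iN : Int) SR SC (RC, CC, count, srow, scol) (t : Int)
          = if pvShowsOne (pvGet grid (t : Int) (iN : Int)) (SR + pvSuf CC t) then
              (RC, CC.set t (CC.getD t 0 + 1), count + 1, pvSuf RC t, pvSuf CC t + 1)
            else (RC, CC, count, pvSuf RC t, pvSuf CC t) := by
        simp only [pvBBody, hxr, hxc, hcond1, h1, Bool.false_eq_true, if_false, hsetY]
      by_cases h2 : (w t iN == "1") = true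
      · -- only the column check fires
        have hM : pvStepS iN t (w, c) = (pvFlipS w t iN, c + 1) := by
          simp [pvStepS, h1, h2]
        rw [hB, hcond2, if_pos h2]
        apply pvSOut_shift grid n iN w _ c _ t _ (by rw [hmodel, hM])
        apply ih (by omega)
        refine ⟨hL1, by simpa using hL2, hN1, hN2', by omega, rfl, ?_, hSR, ?_, ?_⟩
        · rw [pvSuf_set_succ CC t htl2 t, if_pos (le_refl t)]
        · rw [pvSuf_set_succ CC t htl2 iN, if_neg (by omega), hSC]
          ring
        · exact pvUpdCol grid iN t w RC CC (by omega) htl2 hN1 hN2 hW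
      · -- neither fires
        rw [Bool.not_eq_true] at h2
        have hM : pvStepS iN t (w, c) = (w, c) := by
          simp [pvStepS, h1, h2]
        rw [hB, hcond2]
        simp only [h2, Bool.false_eq_true, if_false]
        apply pvSOut_shift grid n iN w _ c _ t _ (by rw [hmodel, hM])
        apply ih (by omega)
        exact ⟨hL1, hL2, hN1, hN2, hC, rfl, rfl, hSR, hSC, hW⟩

theorem pvOuterB (grid : List (List String)) : ∀ (m : Nat), m ≤ grid.length →
    ∀ (w : Nat → Nat → String) (c : Int) (RC CC : List Int) (count : Int),
    RC.length = grid.length → CC.length = grid.length →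
    (∀ y, 0 ≤ RC.getD y 0) → (∀ y, 0 ≤ CC.getD y 0) → count = c →
    (∀ a b, a < m → b < m →
      w a b = pvTpow (pvSuf RC b + pvSuf CC a).toNat (pvW0 grid a b)) →
    ((PySem.List.pyRange ((m : Int) - 1) (-1) (-1)).foldl
      (fun (st : List Int × List Int × Int) i =>
        let st :=
          if pvShowsOne (pvGet grid i i)
              ((PySem.List.slice st.1 (some i) none).sum
                + (PySem.List.slice st.2.1 (some i) none).sum) then
            (PySem.List.pySetD st.1 i (PySem.List.pyGetD st.1 i 0 + 1), st.2.1, st.2.2 + 1)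
          else st
        let sr := (PySem.List.slice st.1 (some i) none).sum
        let sc := (PySem.List.slice st.2.1 (some i) none).sum
        let q := (PySem.List.pyRange (i - 1) (-1) (-1)).foldl (pvBBody grid i sr sc)
          (st.1, st.2.1, st.2.2, sr, sc)
        (q.1, q.2.1, q.2.2.1))
      (RC, CC, count)).2.2
      = (pvOuterS (w, c) m).2 := by
  intro m
  induction m with
  | zero =>
    intro _ w c RC CC count _ _ _ _ hc _
    have h0 : PySem.List.pyRange (((0 : Nat) : Int) - 1) (-1) (-1) = [] := by
      rw [show (((0 : Nat) : Int) - 1) = -1 by norm_num]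
      exact PySem.List.pyRange_neg_one_eq_nil (by omega)
    rw [h0]
    exact hc
  | succ m ih =>
    intro hm w c RC CC count hLX hLY hNX hNY hc hW
    have hm' : m < grid.length := by omega
    have hml : m < RC.length := by omega
    have hc1 : (((m + 1 : Nat) : Int) - 1) = (m : Int) := by push_cast; ring
    have hcons : PySem.List.pyRange ((m : Int)) (-1) (-1)
        = (m : Int) :: PySem.List.pyRange ((m : Int) - 1) (-1) (-1) :=
      PySem.List.pyRange_neg_one_cons (by omega)
    have heq : pvOuterS (w, c) (m + 1) = pvOuterS (pvInnerS m (w, c) (m + 1)) m := rfl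
    have hinner : pvInnerS m (w, c) (m + 1) = pvInnerS m (pvStepS m m (w, c)) m := rfl
    rw [hc1, hcons, List.foldl_cons, heq, hinner]
    dsimp only
    have hW' : ∀ a b, a ≤ m → b ≤ m →
        w a b = pvTpow (pvSuf RC b + pvSuf CC a).toNat (pvW0 grid a b) :=
      fun a b ha hb => hW a b (by omega) (by omega)
    have hknn : 0 ≤ pvSuf RC m + pvSuf CC m :=
      add_nonneg (pvSuf_nonneg RC m hNX) (pvSuf_nonneg CC m hNY)
    have hgetD : pvGet grid (m : Int) (m : Int) = pvW0 grid m m := by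
      rw [pvGet_natCast]; rfl
    have hcondD : pvShowsOne (pvGet grid (m : Int) (m : Int)) (pvSuf RC m + pvSuf CC m)
        = (w m m == "1") := by
      rw [hgetD, pvShowsOne_eq _ _ hknn, hW' m m (le_refl _) (le_refl _), pvTpow_read]
    have hsetX : PySem.List.pySetD RC (m : Int) (PySem.List.pyGetD RC (m : Int) 0 + 1)
        = RC.set m (RC.getD m 0 + 1) := by
      simp
    rw [pvSlice_sum RC m, pvSlice_sum CC m, hcondD]
    by_cases hd : (w m m == "1") = true
    · -- the diagonal cell fires (recorded as a row flip)
      have hMdiag : pvStepS m m (w, c) = (pvFlipS w m m, c + 1) := by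
        rw [pvStepS_diag, if_pos hd]
      have hN1' : ∀ y, 0 ≤ (RC.set m (RC.getD m 0 + 1)).getD y 0 := by
        intro y
        rw [pvGetD_set]
        by_cases hy : y = m ∧ m < RC.length
        · rw [if_pos hy]; have := hNX m; omega
        · rw [if_neg hy]; exact hNX y
      have hW1 : ∀ a b, a ≤ m → b ≤ m → pvFlipS w m m a b
          = pvTpow (pvSuf (RC.set m (RC.getD m 0 + 1)) b + pvSuf CC a).toNat (pvW0 grid a b) :=
        pvUpdRow grid m m w RC CC (le_refl _) hml hNX hNY hW'
      rw [if_pos hd, hsetX, hMdiag]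
      rw [pvSlice_sum (RC.set m (RC.getD m 0 + 1)) m, pvSlice_sum CC m]
      have hout := pvSweep grid grid.length m hm'
        (pvSuf (RC.set m (RC.getD m 0 + 1)) m) (pvSuf CC m) m (le_refl _)
        (pvFlipS w m m) (c + 1) (RC.set m (RC.getD m 0 + 1)) CC (count + 1)
        (pvSuf (RC.set m (RC.getD m 0 + 1)) m) (pvSuf CC m)
        ⟨by simpa using hLX, hLY, hN1', hNY, by omega, rfl, rfl, rfl, rfl, hW1⟩
      obtain ⟨hQ1, hQ2, hQ3, hQ4, hQ5, hQ6⟩ := hout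
      rw [← Prod.mk.eta (p := pvInnerS m (pvFlipS w m m, c + 1) m)]
      exact ih (by omega) _ _ _ _ _ hQ1 hQ2 hQ3 hQ4 hQ5
        (fun a b ha hb => hQ6 a b (by omega) (by omega))
    · -- the diagonal cell does not fire
      rw [Bool.not_eq_true] at hd
      have hMdiag : pvStepS m m (w, c) = (w, c) := by
        rw [pvStepS_diag, if_neg (by simp [hd])]
      simp only [hd, Bool.false_eq_true, if_false]
      rw [hMdiag]
      rw [pvSlice_sum RC m, pvSlice_sum CC m]
      have hout := pvSweep grid grid.length m hm' (pvSuf RC m) (pvSuf CC m) m (le_refl _)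
        w c RC CC count (pvSuf RC m) (pvSuf CC m)
        ⟨hLX, hLY, hNX, hNY, hc, rfl, rfl, rfl, rfl, hW'⟩
      obtain ⟨hQ1, hQ2, hQ3, hQ4, hQ5, hQ6⟩ := hout
      rw [← Prod.mk.eta (p := pvInnerS m (w, c) m)]
      exact ih (by omega) _ _ _ _ _ hQ1 hQ2 hQ3 hQ4 hQ5
        (fun a b ha hb => hQ6 a b (by omega) (by omega))

theorem pvRepl_getD (n : Nat) (y : Nat) : (List.replicate n (0 : Int)).getD y 0 = 0 := by
  rcases Nat.lt_or_ge y n with h | h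
  · rw [List.getD_eq_getElem _ 0 (by simpa using h), List.getElem_replicate]
  · rw [List.getD_eq_default _ 0 (by simpa using h)]

theorem pvSuf_repl (n b : Nat) : pvSuf (List.replicate n (0 : Int)) b = 0 := by
  unfold pvSuf
  rw [List.drop_replicate]
  simp

theorem pvB_eq (grid : List (List String)) :
    getNumOfTip_alt grid = (pvOuterS (pvW0 grid, 0) grid.length).2 := by
  have h := pvOuterB grid grid.length (le_refl _) (pvW0 grid) 0
    (List.replicate grid.length 0) (List.replicate grid.length 0) 0
    (by simp) (by simp) (fun y => by rw [pvRepl_getD]) (fun y => by rw [pvRepl_getD]) rfl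
    (fun a b _ _ => by rw [pvSuf_repl, pvSuf_repl]; rfl)
  exact h

-- ===== VERDICT (by name: the statement is the Claim_ definition above) =====
theorem getNumOfTip_spec : Claim_equal_getNumOfTip := by
  intro grid _ hpre
  unfold Spec_getNumOfTip
  rw [pvA_eq grid hpre, pvB_eq grid]
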